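-- pv_equiv track=rewrite | github.com/DoyelMishra15/DSA | BinarySearch/BS on answers/smallestDivThresh.py | see
-- ===== SOURCE A (Python) =====
-- def can(arr,mid,k,n):
--   s=0
--   for i in arr:
--     if i%mid!=0:
--       s+=(i//mid)+1
--     else:
--       s+=(i//mid)
--   return s
--
-- def see(arr,k,n):
--   ans=-1
--   l,r=min(arr),max(arr)
--   while l<=r:
--     mid=(l+r)//2
--     if can(arr,mid,k,n)<=k:
--       ans=mid
--       r=mid-1
--     else:
--       l=mid+1
--   return ans
-- ===== SOURCE B (Python) =====
-- def see(arr, k, n):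
--     def ok(d):
--         return sum(-(-i // d) for i in arr) <= k
--
--     def go(l, r):
--         if l > r:
--             return None
--         m = (l + r) // 2
--         if ok(m):
--             res = go(l, m - 1)
--             return m if res is None else res
--         return go(m + 1, r)
--
--     res = go(min(arr), max(arr))
--     return -1 if res is None else res
-- ===== Notes on version B (the rewrite author's own statement) =====
-- stated objective: alternative
-- what changed: B recasts A's iterative binary search (mutable ans accumulator, remainder-test ceiling) as a recursive first-match search over the same interval, returning None/a value and combining the left result with the probe, with each ceiling computed by the closed idiom -(-i // d) instead of i//d plus a remainder test.
import Mathlib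
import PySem

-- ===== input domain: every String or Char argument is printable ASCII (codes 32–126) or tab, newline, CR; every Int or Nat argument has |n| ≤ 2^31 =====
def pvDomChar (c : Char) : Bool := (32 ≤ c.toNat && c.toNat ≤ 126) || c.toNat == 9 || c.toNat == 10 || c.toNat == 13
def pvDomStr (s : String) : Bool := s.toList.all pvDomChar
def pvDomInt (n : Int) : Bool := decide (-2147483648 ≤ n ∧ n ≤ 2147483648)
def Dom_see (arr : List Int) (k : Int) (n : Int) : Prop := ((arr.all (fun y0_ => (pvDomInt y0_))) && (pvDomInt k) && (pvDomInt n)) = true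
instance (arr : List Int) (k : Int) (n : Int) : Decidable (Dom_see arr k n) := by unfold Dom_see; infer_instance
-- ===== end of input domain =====

-- B recasts the iterative binary search as a recursive first-match search (None sentinel,
-- no ans accumulator) with the closed ceiling idiom -(-i // d); objective: alternative.

-- ===== PORT A =====
-- port of can(arr, mid, k, n)
def canA (arr : List Int) (mid : Int) (k : Int) (n : Int) : Int :=
  arr.foldl (fun s i =>
    if PySem.Int.mod i mid ≠ 0 then s + (PySem.Int.floordiv i mid + 1)
    else s + PySem.Int.floordiv i mid) 0

-- the while-loop of see, as recursion on the interval width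
def seeLoop (arr : List Int) (k : Int) (n : Int) (l r ans : Int) : Int :=
  if h : l ≤ r then
    let mid := PySem.Int.floordiv (l + r) 2
    if canA arr mid k n ≤ k then seeLoop arr k n l (mid - 1) mid
    else seeLoop arr k n (mid + 1) r ans
  else ans
termination_by (r + 1 - l).toNat
decreasing_by
  · have := PySem.Int.floordiv_two_mid_bounds h; omega
  · have := PySem.Int.floordiv_two_mid_bounds h; omega

def see (arr : List Int) (k : Int) (n : Int) : Int :=
  match PySem.List.min? arr (fun x => x), PySem.List.max? arr (fun x => x) with
  | some l, some r => seeLoop arr k n l r (-1)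
  | _, _ => -1   -- unreachable under Pre_see (min/max of [] raise in Python)

-- ===== PORT B =====
-- ok(d): sum(-(-i // d) for i in arr) <= k
def okB (arr : List Int) (k : Int) (d : Int) : Bool :=
  arr.foldl (fun s i => s + (-(PySem.Int.floordiv (-i) d))) 0 ≤ k

-- go(l, r): recursive first-match search, None = not found
def goB (arr : List Int) (k : Int) (l r : Int) : Option Int :=
  if h : l > r then none
  else
    let m := PySem.Int.floordiv (l + r) 2
    if okB arr k m then
      match goB arr k l (m - 1) with
      | none => some m
      | some res => some res
    else goB arr k (m + 1) r
termination_by (r + 1 - l).toNat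
decreasing_by
  · have := PySem.Int.floordiv_two_mid_bounds (by omega : l ≤ r); omega
  · have := PySem.Int.floordiv_two_mid_bounds (by omega : l ≤ r); omega

def see_alt (arr : List Int) (k : Int) (n : Int) : Int :=
  match PySem.List.min? arr (fun x => x) with
  | none => -1   -- unreachable under Pre_see
  | some lo =>
    match PySem.List.max? arr (fun x => x) with
    | none => -1   -- unreachable under Pre_see
    | some hi =>
      match goB arr k lo hi with
      | none => -1
      | some res => res

-- ===== PRECONDITION & SPEC =====
-- input-inspection helpers for Pre_ (they do not run the search)
def pvLo (arr : List Int) : Int := (PySem.List.min? arr (fun x => x)).getD 0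
def pvHi (arr : List Int) : Int := (PySem.List.max? arr (fun x => x)).getD 0
-- sum of ceilings ceil(i/d), the quantity the task thresholds against k
def pvCeilSum (arr : List Int) (d : Int) : Int := (arr.map (fun i => -(PySem.Int.floordiv (-i) d))).sum
-- at a midpoint m on the bisection chain toward 0, the threshold test steers the search AWAY from 0
def pvAway (arr : List Int) (k m : Int) : Prop := (0 < m ∧ k < pvCeilSum arr m) ∨ (m < 0 ∧ pvCeilSum arr m ≤ k)
-- the midpoints an interval bisection passes on the way from [l, r] down to 0 (≤ log₂(r-l) of them; determined by l and r alone)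
def pvChain : Nat → Int → Int → List Int
  | 0, _, _ => []
  | w+1, l, r => (fun m => if m = 0 then [] else m :: (if 0 < m then pvChain w l (m-1) else pvChain w (m+1) r)) (PySem.Int.floordiv (l+r) 2)

-- Pre_ excludes exactly the inputs on which A raises: the empty list (min/max raise
-- ValueError) and the lists whose bisection of [min, max] reaches divisor 0 — i.e. 0 lies
-- in [min, max] and at every midpoint of the chain toward 0 the ceiling-sum test steers
-- the search toward 0 (ZeroDivisionError); B raises on exactly the same inputs.
def Pre_see (arr : List Int) (k : Int) (n : Int) : Prop :=
  arr ≠ [] ∧ (1 ≤ pvLo arr ∨ pvHi arr ≤ -1 ∨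
    ∃ m ∈ pvChain (pvHi arr + 1 - pvLo arr).toNat (pvLo arr) (pvHi arr), pvAway arr k m)
instance (arr : List Int) (k : Int) (n : Int) : Decidable (Pre_see arr k n) := by
  unfold Pre_see pvAway; infer_instance

def pvWitness_see : List Int × Int × Int := ([1, 2, 5, 9], 6, 4)

def Spec_see (arr : List Int) (k : Int) (n : Int) (out : Int) : Prop := out = see_alt arr k n
instance (arr : List Int) (k : Int) (n : Int) (out : Int) : Decidable (Spec_see arr k n out) := by unfold Spec_see; infer_instance

-- ===== CLAIM (what is proved, stated in full; the proofs are below) =====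
def Claim_equal_see : Prop := ∀ (arr : List Int) (k : Int) (n : Int), Dom_see arr k n → Pre_see arr k n → Spec_see arr k n (see arr k n)

-- ===== LEMMAS AND PROOFS =====

-- A's remainder-test ceiling equals B's negated floor division, for every nonzero divisor
lemma ceil_step (i d : Int) (hd : d ≠ 0) :
    (if PySem.Int.mod i d ≠ 0 then PySem.Int.floordiv i d + 1 else PySem.Int.floordiv i d)
      = -(PySem.Int.floordiv (-i) d) := by
  have h1 := PySem.Int.floordiv_mul_add_mod i d
  have h2 := PySem.Int.floordiv_mul_add_mod (-i) d
  set q := PySem.Int.floordiv i d with hq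
  set r := PySem.Int.mod i d with hr
  set q' := PySem.Int.floordiv (-i) d with hq'
  set r' := PySem.Int.mod (-i) d with hr'
  have hsum : (q + q') * d = -(r + r') := by
    have e : (q + q') * d = q * d + q' * d := by ring
    omega
  rcases lt_or_gt_of_ne hd with hneg | hpos
  · -- d < 0 : d < r ≤ 0 and d < r' ≤ 0
    have hb1 := PySem.Int.mod_neg_bounds i hneg
    have hb2 := PySem.Int.mod_neg_bounds (-i) hneg
    rw [← hr] at hb1; rw [← hr'] at hb2
    by_cases hz : r = 0
    · have hs : q + q' = 0 := by
        rcases lt_trichotomy (q + q') 0 with hlt | heq | hgt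
        · have : (q + q') * d ≥ (-1) * d := by
            have := mul_le_mul_of_nonpos_right (by omega : q + q' ≤ -1) (le_of_lt hneg)
            omega
          have e : (-1 : Int) * d = -d := by ring
          omega
        · exact heq
        · have : (q + q') * d ≤ 1 * d := by
            have := mul_le_mul_of_nonpos_right (by omega : 1 ≤ q + q') (le_of_lt hneg)
            omega
          omega
      simp only [hz, ne_eq, not_true_eq_false, if_false]
      omega
    · have hs : q + q' = -1 := by
        rcases lt_trichotomy (q + q') (-1) with hlt | heq | hgt
        · have : (q + q') * d ≥ (-2) * d := by
            have := mul_le_mul_of_nonpos_right (by omega : q + q' ≤ -2) (le_of_lt hneg)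
            omega
          have e : (-2 : Int) * d = -d + -d := by ring
          omega
        · exact heq
        · have : (q + q') * d ≤ 0 * d := by
            have := mul_le_mul_of_nonpos_right (by omega : 0 ≤ q + q') (le_of_lt hneg)
            omega
          omega
      simp only [ne_eq, hz, not_false_eq_true, if_true]
      omega
  · -- 0 < d : 0 ≤ r < d and 0 ≤ r' < d
    have hb1l := PySem.Int.mod_nonneg i hpos
    have hb1r := PySem.Int.mod_lt i hpos
    have hb2l := PySem.Int.mod_nonneg (-i) hpos
    have hb2r := PySem.Int.mod_lt (-i) hpos
    rw [← hr] at hb1l hb1r; rw [← hr'] at hb2l hb2r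
    by_cases hz : r = 0
    · have hs : q + q' = 0 := by
        rcases lt_trichotomy (q + q') 0 with hlt | heq | hgt
        · have : (q + q') * d ≤ (-1) * d := by
            have := mul_le_mul_of_nonneg_right (by omega : q + q' ≤ -1) (le_of_lt hpos)
            omega
          have e : (-1 : Int) * d = -d := by ring
          omega
        · exact heq
        · have : (q + q') * d ≥ 1 * d := by
            have := mul_le_mul_of_nonneg_right (by omega : 1 ≤ q + q') (le_of_lt hpos)
            omega
          omega
      simp only [hz, ne_eq, not_true_eq_false, if_false]
      omega
    · have hs : q + q' = -1 := by
        rcases lt_trichotomy (q + q') (-1) with hlt | heq | hgt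
        · have : (q + q') * d ≤ (-2) * d := by
            have := mul_le_mul_of_nonneg_right (by omega : q + q' ≤ -2) (le_of_lt hpos)
            omega
          have e : (-2 : Int) * d = -d + -d := by ring
          omega
        · exact heq
        · have : (q + q') * d ≥ 0 * d := by
            have := mul_le_mul_of_nonneg_right (by omega : 0 ≤ q + q') (le_of_lt hpos)
            omega
          omega
      simp only [ne_eq, hz, not_false_eq_true, if_true]
      omega

lemma foldl_add_shift (arr : List Int) (f : Int → Int) :
    ∀ s : Int, arr.foldl (fun s i => s + f i) s = s + (arr.map f).sum := by
  induction arr with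
  | nil => intro s; simp
  | cons a t ih => intro s; simp [List.foldl_cons, ih]; ring

lemma canA_eq_ceilSum (arr : List Int) (d k n : Int) (hd : d ≠ 0) :
    canA arr d k n = pvCeilSum arr d := by
  unfold canA pvCeilSum
  have hA : arr.foldl (fun s i =>
      if PySem.Int.mod i d ≠ 0 then s + (PySem.Int.floordiv i d + 1)
      else s + PySem.Int.floordiv i d) 0
      = arr.foldl (fun s i => s + (if PySem.Int.mod i d ≠ 0 then PySem.Int.floordiv i d + 1
          else PySem.Int.floordiv i d)) 0 := by
    congr 1; funext s i; split_ifs <;> rfl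
  rw [hA,
    foldl_add_shift arr (fun i => if PySem.Int.mod i d ≠ 0 then PySem.Int.floordiv i d + 1
      else PySem.Int.floordiv i d) 0,
    List.map_congr_left (l := arr) (fun i _ => ceil_step i d hd)]
  omega

-- A's comparison and B's ok agree at every nonzero probe
lemma canA_le_iff_okB (arr : List Int) (d k n : Int) (hd : d ≠ 0) :
    (canA arr d k n ≤ k) ↔ (okB arr k d = true) := by
  unfold okB
  rw [decide_eq_true_eq, canA_eq_ceilSum arr d k n hd,
    foldl_add_shift arr (fun i => -(PySem.Int.floordiv (-i) d)) 0]
  unfold pvCeilSum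
  omega

-- an interval that stays on one side of 0 never probes 0: loop and recursive search agree
lemma seeLoop_eq_goB_side (arr : List Int) (k n : Int) :
    ∀ (fuel : Nat) (l r ans : Int), (r + 1 - l).toNat ≤ fuel →
    (1 ≤ l ∨ r ≤ -1) →
    seeLoop arr k n l r ans =
      (match goB arr k l r with | some t => t | none => ans) := by
  intro fuel
  induction fuel with
  | zero =>
    intro l r ans hd hside
    have hlr : ¬ (l ≤ r) := by omega
    rw [seeLoop, dif_neg hlr, goB, dif_pos (by omega : l > r)]
  | succ m ih =>
    intro l r ans hd hside
    by_cases hlr : l ≤ r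
    case neg =>
      rw [seeLoop, dif_neg hlr, goB, dif_pos (by omega : l > r)]
    case pos =>
      have hmid := PySem.Int.floordiv_two_mid_bounds hlr
      rw [seeLoop, dif_pos hlr, goB, dif_neg (by omega : ¬ l > r)]
      show (if canA arr (PySem.Int.floordiv (l + r) 2) k n ≤ k then
          seeLoop arr k n l (PySem.Int.floordiv (l + r) 2 - 1) (PySem.Int.floordiv (l + r) 2)
        else seeLoop arr k n (PySem.Int.floordiv (l + r) 2 + 1) r ans) = _
      set mid := PySem.Int.floordiv (l + r) 2 with hmiddef
      have hdz : mid ≠ 0 := by omega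
      have hpred : (canA arr mid k n ≤ k) ↔ (okB arr k mid = true) :=
        canA_le_iff_okB arr mid k n hdz
      by_cases hc : canA arr mid k n ≤ k
      · rw [if_pos hc]
        have hok : okB arr k mid = true := hpred.mp hc
        simp only [hok, if_true]
        rw [ih l (mid - 1) mid (by omega) (by omega)]
        rcases hgo : goB arr k l (mid - 1) with _ | t <;> simp
      · rw [if_neg hc]
        have hok : okB arr k mid = false := by
          rcases hb : okB arr k mid
          · rfl
          · exact absurd (hpred.mpr hb) hc
        simp only [hok, Bool.false_eq_true, if_false]
        exact ih (mid + 1) r ans (by omega) (by omega)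

-- an interval containing 0 whose bisection chain toward 0 steers away somewhere never probes 0 either
lemma seeLoop_eq_goB_chain (arr : List Int) (k n : Int) :
    ∀ (w : Nat) (l r ans : Int), l ≤ 0 → 0 ≤ r →
    (∃ m ∈ pvChain w l r, pvAway arr k m) →
    seeLoop arr k n l r ans =
      (match goB arr k l r with | some t => t | none => ans) := by
  intro w
  induction w with
  | zero =>
    intro l r ans hl hr hc
    simp [pvChain] at hc
  | succ w ih =>
    intro l r ans hl hr hc
    have hlr : l ≤ r := by omega
    have hmid := PySem.Int.floordiv_two_mid_bounds hlr
    rw [seeLoop, dif_pos hlr, goB, dif_neg (by omega : ¬ l > r)]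
    show (if canA arr (PySem.Int.floordiv (l + r) 2) k n ≤ k then
        seeLoop arr k n l (PySem.Int.floordiv (l + r) 2 - 1) (PySem.Int.floordiv (l + r) 2)
      else seeLoop arr k n (PySem.Int.floordiv (l + r) 2 + 1) r ans) = _
    have hch : pvChain (w+1) l r
        = (fun m => if m = 0 then [] else
            m :: (if 0 < m then pvChain w l (m-1) else pvChain w (m+1) r))
          (PySem.Int.floordiv (l+r) 2) := rfl
    set mid := PySem.Int.floordiv (l + r) 2 with hmiddef
    by_cases hz : mid = 0
    · rw [hch] at hc; simp only [hz] at hc; simp at hc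
    rw [hch] at hc
    simp only [if_neg hz] at hc
    have hdz : mid ≠ 0 := hz
    have hpred : (canA arr mid k n ≤ k) ↔ (okB arr k mid = true) :=
      canA_le_iff_okB arr mid k n hdz
    have hcs : pvCeilSum arr mid = canA arr mid k n := (canA_eq_ceilSum arr mid k n hdz).symm
    by_cases hcond : canA arr mid k n ≤ k
    · rw [if_pos hcond]
      have hok : okB arr k mid = true := hpred.mp hcond
      simp only [hok, if_true]
      have hrec : seeLoop arr k n l (mid - 1) mid
          = (match goB arr k l (mid - 1) with | some t => t | none => mid) := by
        by_cases hm : 0 < mid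
        · -- left interval still contains 0; the chain witness cannot be mid (mid steers toward 0)
          simp only [if_pos hm] at hc
          rcases hc with ⟨m, hmem, haway⟩
          rcases List.mem_cons.mp hmem with rfl | htail
          · rcases haway with ⟨_, hgt⟩ | ⟨hneg, _⟩
            · omega
            · omega
          · exact ih l (mid - 1) mid hl (by omega) ⟨m, htail, haway⟩
        · -- mid < 0: the left interval lies entirely below 0
          exact seeLoop_eq_goB_side arr k n (mid - 1 + 1 - l).toNat l (mid - 1) mid
            le_rfl (Or.inr (by omega))
      rw [hrec]
      rcases hgo : goB arr k l (mid - 1) with _ | t <;> simp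
    · rw [if_neg hcond]
      have hok : okB arr k mid = false := by
        rcases hb : okB arr k mid
        · rfl
        · exact absurd (hpred.mpr hb) hcond
      simp only [hok, Bool.false_eq_true, if_false]
      by_cases hm : 0 < mid
      · -- mid > 0: the right interval lies entirely above 0
        exact seeLoop_eq_goB_side arr k n (r + 1 - (mid + 1)).toNat (mid + 1) r ans
          le_rfl (Or.inl (by omega))
      · -- mid < 0 and the search goes right, toward 0: the chain witness cannot be mid
        simp only [if_neg hm] at hc
        rcases hc with ⟨m, hmem, haway⟩
        rcases List.mem_cons.mp hmem with rfl | htail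
        · rcases haway with ⟨hpos, _⟩ | ⟨_, hle⟩
          · omega
          · omega
        · exact ih (mid + 1) r ans (by omega) hr ⟨m, htail, haway⟩

-- ===== VERDICT (by name: the statement is the Claim_ definition above) =====
theorem see_spec : Claim_equal_see := by
  intro arr k n hdom ⟨hne, hd⟩
  unfold Spec_see see see_alt
  rcases hmin : PySem.List.min? arr (fun x => x) with _ | l0
  · exact absurd ((PySem.List.min?_eq_none_iff arr (fun x => x)).mp hmin) hne
  rcases hmax : PySem.List.max? arr (fun x => x) with _ | r0
  · exact absurd ((PySem.List.max?_eq_none_iff arr (fun x => x)).mp hmax) hne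
  have hlo : pvLo arr = l0 := by unfold pvLo; rw [hmin]; rfl
  have hhi : pvHi arr = r0 := by unfold pvHi; rw [hmax]; rfl
  rw [hlo, hhi] at hd
  simp only []
  rcases hd with h | h | h
  · rw [seeLoop_eq_goB_side arr k n (r0 + 1 - l0).toNat l0 r0 (-1) le_rfl (Or.inl h)]
    rcases hgo : goB arr k l0 r0 with _ | t <;> rfl
  · rw [seeLoop_eq_goB_side arr k n (r0 + 1 - l0).toNat l0 r0 (-1) le_rfl (Or.inr h)]
    rcases hgo : goB arr k l0 r0 with _ | t <;> rfl
  · by_cases hs : 1 ≤ l0 ∨ r0 ≤ -1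
    · rw [seeLoop_eq_goB_side arr k n (r0 + 1 - l0).toNat l0 r0 (-1) le_rfl hs]
      rcases hgo : goB arr k l0 r0 with _ | t <;> rfl
    · rw [not_or] at hs; obtain ⟨hs1, hs2⟩ := hs
      rw [seeLoop_eq_goB_chain arr k n (r0 + 1 - l0).toNat l0 r0 (-1)
        (by omega) (by omega) h]
      rcases hgo : goB arr k l0 r0 with _ | t <;> rfl
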